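-- pv_equiv track=rewrite | github.com/hanwgyu/CTCI_solution | Leetcode/Satisfiability_of_Equality_Equations.py | equationsPossible_1
-- ===== SOURCE A (Python) =====
-- from typing import List
--
-- from collections import defaultdict
--
-- def equationsPossible_1(equations: List[str]) -> bool:
--     def canMeet(src, dst, visited):
--         if src == dst:
--             return True
--         visited[src] = True
--         for a in graph[src]:
--             if visited[a]:
--                 continue
--             if canMeet(a, dst, visited):
--                 return True
--         return False
--
--     graph = defaultdict(list)
--     for e in equations:
--         if e[1] == "=":
--             graph[e[0]].append(e[3])
--             graph[e[3]].append(e[0])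
--
--     for e in equations:
--         if e[1] == "!":
--             if canMeet(e[0], e[3], defaultdict(lambda: False)):
--                 return False
--     return True
-- ===== SOURCE B (Python) =====
-- def equationsPossible_1(equations):
--     # One pass over the equalities maintaining a representative label per seen
--     # variable (merging by relabelling), then each inequality is checked by
--     # comparing two labels -- instead of a DFS per inequality.
--     rep = {}
--     for e in equations:
--         if e[1] == "=":
--             ra = rep.setdefault(e[0], e[0])
--             rb = rep.setdefault(e[3], e[3])
--             if ra != rb:
--                 for k, v in rep.items():
--                     if v == rb:
--                         rep[k] = ra
--     return all(not (e[1] == "!" and rep.get(e[0], e[0]) == rep.get(e[3], e[3]))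
--                for e in equations)
-- ===== Notes on version B (the rewrite author's own statement) =====
-- stated objective: alternative
-- what changed: Replaces a DFS over the equality graph per inequality with a single pass that maintains a representative label per variable (merging by relabelling), so each inequality is checked by comparing two labels.
-- outside the precondition, e.g. on equationsPossible_1(['a!=a', 'x!']): A returns False, B returns False
import Mathlib
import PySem

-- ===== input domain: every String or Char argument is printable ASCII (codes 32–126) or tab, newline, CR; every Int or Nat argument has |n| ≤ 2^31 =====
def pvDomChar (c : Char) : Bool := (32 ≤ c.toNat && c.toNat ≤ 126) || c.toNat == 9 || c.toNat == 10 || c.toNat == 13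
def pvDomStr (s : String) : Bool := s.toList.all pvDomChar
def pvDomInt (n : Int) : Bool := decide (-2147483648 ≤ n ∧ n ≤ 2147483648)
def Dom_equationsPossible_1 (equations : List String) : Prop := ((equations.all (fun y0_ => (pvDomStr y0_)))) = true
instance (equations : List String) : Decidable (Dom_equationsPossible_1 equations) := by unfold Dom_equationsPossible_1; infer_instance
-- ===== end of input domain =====

-- B replaces A's per-inequality DFS with one labelling pass over the equalities, then checks each
-- inequality by comparing two labels (objective: alternative). Return-value equivalence; no observable mutation.

-- ===== PORT A =====
-- e[i] for i = 0, 1, 3: exact wherever Python does not raise IndexError (i.e. inside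
-- Pre_equationsPossible_1); the default ' ' is only reached outside Pre_.
def chAt (s : String) (n : Nat) : Char := s.toList.getD n ' '

-- graph = defaultdict(list); for e: if e[1]=='=': graph[e[0]].append(e[3]); graph[e[3]].append(e[0]).
-- defaultdict read-then-append is Dict.modify with default []. (Python's later reads graph[src]
-- insert empty lists into the defaultdict; that never changes any adjacency value, and the
-- graph is only read via lookup, so a pure getD read is exact.)
def buildGraph (equations : List String) : PySem.Dict Char (List Char) :=
  equations.foldl (fun g e =>
    if chAt e 1 = '=' then
      (g.modify (chAt e 0) [] (· ++ [chAt e 3])).modify (chAt e 3) [] (· ++ [chAt e 0])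
    else g) PySem.Dict.empty

-- canMeet(src, dst, visited): 'visited' (a defaultdict-bool used as a set of marked chars) is
-- PySem.Set Char.  The for-loop with its early 'return True' is a foldl threading
-- (found, visited); once found is true every remaining step is skipped, exactly like the
-- early return.  'fuel' only makes the recursion total: it strictly exceeds the number of
-- nodes ever markable, so at the call below it is never exhausted (Python has no fuel).
def canMeet (g : PySem.Dict Char (List Char)) :
    Nat → Char → Char → PySem.Set Char → Bool × PySem.Set Char
  | 0, _, _, vis => (false, vis)
  | fuel+1, src, dst, vis =>
    if src = dst then (true, vis)
    else
      (g.getD src []).foldl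
        (fun st a =>
          if st.1 then st
          else if PySem.Set.contains st.2 a then st
          else canMeet g fuel a dst st.2)
        (false, PySem.Set.add vis src)

-- the second for-loop with its early 'return False'
def checkIneqs (g : PySem.Dict Char (List Char)) (fuel : Nat) : List String → Bool
  | [] => true
  | e :: rest =>
    if chAt e 1 = '!' then
      if (canMeet g fuel (chAt e 0) (chAt e 3) PySem.Set.empty).1 then false
      else checkIneqs g fuel rest
    else checkIneqs g fuel rest

def equationsPossible_1 (equations : List String) : Bool :=
  let g := buildGraph equations
  checkIneqs g (2 * equations.length + 1) equations

-- ===== PORT B =====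
-- the '=' branch of Source B's first loop: two setdefaults, then relabel every entry valued rb to ra
-- (the in-place 'for k,v in rep.items(): if v == rb: rep[k] = ra' keeps keys and order: a map over items)
def bMerge (d : PySem.Dict Char Char) (a b : Char) : PySem.Dict Char Char :=
  let d1 := d.setdefault a a
  let ra := d1.getD a a
  let d2 := d1.setdefault b b
  let rb := d2.getD b b
  if ra ≠ rb then PySem.Dict.mk (d2.items.map (fun p => if p.2 = rb then (p.1, ra) else p))
  else d2

def bStep (d : PySem.Dict Char Char) (e : String) : PySem.Dict Char Char :=
  if chAt e 1 = '=' then bMerge d (chAt e 0) (chAt e 3) else d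

def equationsPossible_1_alt (equations : List String) : Bool :=
  let rep := equations.foldl bStep PySem.Dict.empty
  equations.all (fun e =>
    !(chAt e 1 == '!' && rep.getD (chAt e 0) (chAt e 0) == rep.getD (chAt e 3) (chAt e 3)))

-- ===== PRECONDITION & SPEC =====
-- Pre_: every equation has length ≥ 2 and, when its char 1 is '=' or '!', length ≥ 4 —
-- otherwise A raises IndexError on e[1] or e[3].  Slightly narrower than A's exact
-- non-raising set: A's second loop can return False at an early contradictory inequality
-- before ever reaching a later malformed string (see claim cites).
def Pre_equationsPossible_1 (equations : List String) : Prop :=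
  ∀ e ∈ equations, 2 ≤ e.toList.length ∧
    ((e.toList[1]? = some '=' ∨ e.toList[1]? = some '!') → 4 ≤ e.toList.length)
instance (equations : List String) : Decidable (Pre_equationsPossible_1 equations) := by
  unfold Pre_equationsPossible_1; infer_instance

def pvWitness_equationsPossible_1 : List String := ["a==b", "b!=c"]

def Spec_equationsPossible_1 (equations : List String) (out : Bool) : Prop :=
  out = equationsPossible_1_alt equations
instance (equations : List String) (out : Bool) : Decidable (Spec_equationsPossible_1 equations out) := by
  unfold Spec_equationsPossible_1; infer_instance

-- ===== CLAIM (what is proved, stated in full; the proofs are below) =====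
def Claim_equal_equationsPossible_1 : Prop :=
  ∀ (equations : List String), Dom_equationsPossible_1 equations →
    Pre_equationsPossible_1 equations →
    Spec_equationsPossible_1 equations (equationsPossible_1 equations)

-- ===== LEMMAS AND PROOFS =====

-- The directed edge list A's graph holds (both orientations of every equality).
def Pairs (equations : List String) : List (Char × Char) :=
  equations.flatMap (fun e =>
    if chAt e 1 = '=' then [(chAt e 0, chAt e 3), (chAt e 3, chAt e 0)] else [])

-- One orientation per equality, in B's processing order.
def QPairs (equations : List String) : List (Char × Char) :=
  equations.flatMap (fun e => if chAt e 1 = '=' then [(chAt e 0, chAt e 3)] else [])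

def PRel (Q : List (Char × Char)) (x y : Char) : Prop := (x, y) ∈ Q

def Conn (P : List (Char × Char)) (x y : Char) : Prop := Relation.ReflTransGen (PRel P) x y

-- every neighbour of a node new relative to vis0 and marked in visA is marked in visB
def NewClosed (P : List (Char × Char)) (vis0 visA visB : PySem.Set Char) : Prop :=
  ∀ x y, (x, y) ∈ P → visA.contains x = true → vis0.contains x = false →
    visB.contains y = true

def SubS (v v' : PySem.Set Char) : Prop := ∀ c, v.contains c = true → v'.contains c = true

-- ---- small set facts ----
theorem set_contains_iff (v : PySem.Set Char) (c : Char) : v.contains c = true ↔ c ∈ v := by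
  exact List.contains_iff_mem

theorem set_contains_empty (c : Char) : (PySem.Set.empty : PySem.Set Char).contains c = false := rfl

theorem set_contains_add (v : PySem.Set Char) (x c : Char) :
    (PySem.Set.add v x).contains c = true ↔ (v.contains c = true ∨ c = x) := by
  unfold PySem.Set.add
  split_ifs with h
  · simp only [set_contains_iff] at *
    constructor
    · exact Or.inl
    · rintro (hc | rfl) <;> [exact hc; exact h]
  · simp only [set_contains_iff, List.mem_append, List.mem_singleton]

theorem set_contains_add_self (v : PySem.Set Char) (x : Char) :
    (PySem.Set.add v x).contains x = true := by
  rw [set_contains_add]; exact Or.inr rfl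

theorem subS_refl (v : PySem.Set Char) : SubS v v := fun _ h => h

theorem subS_trans {u v w : PySem.Set Char} (h1 : SubS u v) (h2 : SubS v w) : SubS u w :=
  fun c hc => h2 c (h1 c hc)

theorem subS_add (v : PySem.Set Char) (x : Char) : SubS v (PySem.Set.add v x) := by
  intro c hc; rw [set_contains_add]; exact Or.inl hc

-- ---- counting (fuel bookkeeping) ----
theorem len_filter_not_le (p q : Char → Bool) (h : ∀ c, q c = true → p c = true) :
    ∀ N : List Char, (N.filter (fun c => !p c)).length ≤ (N.filter (fun c => !q c)).length := by
  intro N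
  induction N with
  | nil => simp
  | cons a N ih =>
    cases hp : p a <;> cases hq : q a <;>
      simp only [List.filter_cons, hp, hq, Bool.not_true, Bool.not_false, if_true, if_false,
        Bool.false_eq_true, if_false, List.length_cons]
    · exact Nat.succ_le_succ ih
    · exact absurd (h a hq) (by simp [hp])
    · exact Nat.le_succ_of_le ih
    · exact ih

theorem len_filter_not_lt (p q : Char → Bool) (h : ∀ c, q c = true → p c = true)
    (src : Char) (hps : p src = true) (hqs : q src = false) :
    ∀ N : List Char, src ∈ N →
      (N.filter (fun c => !p c)).length < (N.filter (fun c => !q c)).length := by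
  intro N
  induction N with
  | nil => intro hmem; cases hmem
  | cons a N ih =>
    intro hmem
    rcases List.mem_cons.1 hmem with rfl | hmem'
    · simp only [List.filter_cons, hps, hqs, Bool.not_true, Bool.not_false, if_true,
        Bool.false_eq_true, if_false, List.length_cons]
      exact Nat.lt_succ_of_le (len_filter_not_le p q h N)
    · cases hp : p a <;> cases hq : q a <;>
        simp only [List.filter_cons, hp, hq, Bool.not_true, Bool.not_false, if_true, if_false,
          Bool.false_eq_true, if_false, List.length_cons]
      · exact Nat.succ_lt_succ (ih hmem')
      · exact absurd (h a hq) (by simp [hp])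
      · exact Nat.lt_succ_of_lt (ih hmem')
      · exact ih hmem'

-- ---- the adjacency structure A builds ----
theorem Pairs_cons (e : String) (rest : List String) :
    Pairs (e :: rest)
      = (if chAt e 1 = '=' then [(chAt e 0, chAt e 3), (chAt e 3, chAt e 0)] else [])
          ++ Pairs rest := rfl

theorem QPairs_cons (e : String) (rest : List String) :
    QPairs (e :: rest)
      = (if chAt e 1 = '=' then [(chAt e 0, chAt e 3)] else []) ++ QPairs rest := rfl

theorem buildGraph_eq (equations : List String) :
    buildGraph equations
      = (Pairs equations).foldl (fun d p => d.modify p.1 [] (· ++ [p.2])) PySem.Dict.empty := by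
  unfold buildGraph
  generalize PySem.Dict.empty = d
  induction equations generalizing d with
  | nil => simp [Pairs]
  | cons e rest ih =>
    rw [Pairs_cons, List.foldl_cons, List.foldl_append]
    by_cases h : chAt e 1 = '=' <;>
      simp only [h, if_pos, List.foldl_cons, List.foldl_nil] <;>
      exact ih _

theorem adj_eq (equations : List String) (c : Char) :
    (buildGraph equations).getD c []
      = ((Pairs equations).filter (fun p => p.1 == c)).map Prod.snd := by
  rw [buildGraph_eq]
  rw [PySem.Dict.getD_foldl_modify_append]
  simp

theorem mem_adj (equations : List String) (x y : Char) :
    y ∈ (buildGraph equations).getD x [] ↔ (x, y) ∈ Pairs equations := by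
  rw [adj_eq]
  simp only [List.mem_map, List.mem_filter, beq_iff_eq]
  constructor
  · rintro ⟨⟨px, py⟩, ⟨hmem, rfl⟩, rfl⟩
    exact hmem
  · intro h
    exact ⟨(x, y), ⟨h, rfl⟩, rfl⟩

theorem pairs_symm (equations : List String) (x y : Char)
    (h : (x, y) ∈ Pairs equations) : (y, x) ∈ Pairs equations := by
  induction equations with
  | nil => simp [Pairs] at h
  | cons e rest ih =>
    rw [Pairs_cons] at h ⊢
    rw [List.mem_append] at h ⊢
    rcases h with h | h
    · left
      split_ifs at h ⊢ with hc
      · simp only [List.mem_cons, Prod.mk.injEq] at h ⊢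
        tauto
      · simp at h
    · right; exact ih h

theorem fst_mem_nodes (equations : List String) (x y : Char)
    (h : (x, y) ∈ Pairs equations) : x ∈ (Pairs equations).map Prod.snd :=
  List.mem_map.2 ⟨(y, x), pairs_symm equations x y h, rfl⟩

theorem pairs_length_le (equations : List String) :
    (Pairs equations).length ≤ 2 * equations.length := by
  induction equations with
  | nil => simp [Pairs]
  | cons e rest ih =>
    rw [Pairs_cons, List.length_append, List.length_cons]
    split_ifs <;> simp only [List.length_cons, List.length_nil] <;> omega

theorem mem_pairs_iff_qpairs (equations : List String) (x y : Char) :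
    (x, y) ∈ Pairs equations ↔ (x, y) ∈ QPairs equations ∨ (y, x) ∈ QPairs equations := by
  induction equations with
  | nil => simp [Pairs, QPairs]
  | cons e rest ih =>
    rw [Pairs_cons, QPairs_cons, List.mem_append, List.mem_append, List.mem_append]
    split_ifs with hc
    · simp only [List.mem_cons, Prod.mk.injEq, List.not_mem_nil, or_false] at *
      tauto
    · simp only [List.not_mem_nil, false_or] at *
      tauto

-- ---- DFS correctness ----
theorem foldl_canMeet_found (g : PySem.Dict Char (List Char)) (fuel : Nat) (dst : Char)
    (l : List Char) (v : PySem.Set Char) :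
    l.foldl
      (fun st a =>
        if st.1 then st
        else if PySem.Set.contains st.2 a then st
        else canMeet g fuel a dst st.2)
      (true, v) = (true, v) := by
  induction l with
  | nil => rfl
  | cons a l ih => simpa using ih

theorem dfs_post (equations : List String) :
    ∀ (fuel : Nat) (src dst : Char) (vis : PySem.Set Char),
      vis.contains src = false →
      vis.contains dst = false →
      ((((Pairs equations).map Prod.snd)).filter (fun c => !vis.contains c)).length < fuel →
      ∀ r vis', canMeet (buildGraph equations) fuel src dst vis = (r, vis') →
        SubS vis vis' ∧
        (r = true → Conn (Pairs equations) src dst) ∧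
        (r = false → vis'.contains src = true ∧ vis'.contains dst = false ∧
          NewClosed (Pairs equations) vis vis' vis') := by
  intro fuel
  induction fuel with
  | zero => intro src dst vis _ _ hcount; omega
  | succ fuel IH =>
    intro src dst vis hsrc hdst hcount r vis' heq
    rw [canMeet] at heq
    by_cases hsd : src = dst
    · rw [if_pos hsd] at heq
      injection heq with h1 h2
      subst h1; subst h2
      refine ⟨subS_refl vis, fun _ => ?_, fun hf => by cases hf⟩
      exact hsd ▸ Relation.ReflTransGen.refl
    · rw [if_neg hsd] at heq
      have hdst0 : (PySem.Set.add vis src).contains dst = false := by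
        cases h : (PySem.Set.add vis src).contains dst
        · rfl
        · rcases (set_contains_add vis src dst).1 h with h' | h'
          · rw [h'] at hdst; cases hdst
          · exact absurd h'.symm hsd
      -- the inner for-loop
      have fold_go : ∀ (l : List Char), (∀ a ∈ l, (src, a) ∈ Pairs equations) →
          ∀ (v : PySem.Set Char), v.contains dst = false →
          ((((Pairs equations).map Prod.snd)).filter (fun c => !v.contains c)).length < fuel →
          SubS (PySem.Set.add vis src) v →
          NewClosed (Pairs equations) (PySem.Set.add vis src) v v →
          ∀ r' v', l.foldl
              (fun st a =>
                if st.1 then st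
                else if PySem.Set.contains st.2 a then st
                else canMeet (buildGraph equations) fuel a dst st.2)
              (false, v) = (r', v') →
            SubS v v' ∧ (r' = true → Conn (Pairs equations) src dst) ∧
            (r' = false → v'.contains dst = false ∧ (∀ a ∈ l, v'.contains a = true) ∧
              NewClosed (Pairs equations) (PySem.Set.add vis src) v' v') := by
        intro l
        induction l with
        | nil =>
          intro _ v hdv _ _ hacc r' v' hfold
          rw [List.foldl_nil] at hfold
          injection hfold with h1 h2; subst h1; subst h2
          refine ⟨subS_refl v, ?_, ?_⟩
          · intro ht; cases ht
          · intro _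
            refine ⟨hdv, ?_, hacc⟩
            intro a ha; cases ha
        | cons a rest ihl =>
          intro hl v hdv hcv hsubv hacc r' v' hfold
          rw [List.foldl_cons] at hfold
          simp only [if_false, Bool.false_eq_true] at hfold
          by_cases hav : PySem.Set.contains v a = true
          · rw [if_pos hav] at hfold
            obtain ⟨hmono, hconn, hfalse⟩ :=
              ihl (fun a' ha' => hl a' (List.mem_cons_of_mem a ha')) v hdv hcv hsubv hacc r' v' hfold
            refine ⟨hmono, hconn, fun hf => ?_⟩
            obtain ⟨h1, h2, h3⟩ := hfalse hf
            exact ⟨h1, fun a' ha' => by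
              rcases List.mem_cons.1 ha' with rfl | ha''
              · exact hmono a' hav
              · exact h2 a' ha'', h3⟩
          · rw [if_neg hav] at hfold
            have hav' : v.contains a = false := by
              cases h : v.contains a
              · rfl
              · exact absurd h hav
            rcases hcm : canMeet (buildGraph equations) fuel a dst v with ⟨ra, va⟩
            rw [hcm] at hfold
            obtain ⟨smono, sconn, sfalse⟩ := IH a dst v hav' hdv hcv ra va hcm
            cases ra with
            | true =>
              rw [foldl_canMeet_found] at hfold
              injection hfold with h1 h2; subst h1; subst h2
              refine ⟨smono, fun _ => ?_, fun hf => by cases hf⟩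
              exact Relation.ReflTransGen.head (hl a (List.mem_cons_self)) (sconn rfl)
            | false =>
              obtain ⟨hsa, hsd2, sclosed⟩ := sfalse rfl
              have hsubva : SubS (PySem.Set.add vis src) va := subS_trans hsubv smono
              have hacc' : NewClosed (Pairs equations) (PySem.Set.add vis src) va va := by
                intro x y hxy hx hxnew
                by_cases hxv : v.contains x = true
                · exact smono y (hacc x y hxy hxv hxnew)
                · have : v.contains x = false := by cases h : v.contains x; rfl; exact absurd h hxv
                  exact sclosed x y hxy hx this
              have hcva : ((((Pairs equations).map Prod.snd)).filter
                  (fun c => !va.contains c)).length < fuel :=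
                lt_of_le_of_lt
                  (len_filter_not_le (fun c => va.contains c) (fun c => v.contains c) smono _) hcv
              obtain ⟨hmono, hconn, hfalse⟩ :=
                ihl (fun a' ha' => hl a' (List.mem_cons_of_mem a ha')) va hsd2 hcva hsubva hacc'
                  r' v' hfold
              refine ⟨subS_trans smono hmono, hconn, fun hf => ?_⟩
              obtain ⟨h1, h2, h3⟩ := hfalse hf
              refine ⟨h1, fun a' ha' => ?_, h3⟩
              rcases List.mem_cons.1 ha' with rfl | ha''
              · exact hmono a' hsa
              · exact h2 a' ha''
      -- use the loop lemma on the real adjacency list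
      by_cases hsN : src ∈ (Pairs equations).map Prod.snd
      · have hcount0 : ((((Pairs equations).map Prod.snd)).filter
            (fun c => !(PySem.Set.add vis src).contains c)).length < fuel := by
          have hlt := len_filter_not_lt (fun c => (PySem.Set.add vis src).contains c)
            (fun c => vis.contains c) (fun c hc => (set_contains_add vis src c).2 (Or.inl hc))
            src (set_contains_add_self vis src) hsrc ((Pairs equations).map Prod.snd) hsN
          beta_reduce at hlt
          omega
        obtain ⟨hmono, hconn, hfalse⟩ := fold_go ((buildGraph equations).getD src [])
          (fun a ha => (mem_adj equations src a).1 ha) (PySem.Set.add vis src) hdst0 hcount0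
          (subS_refl _) (fun x y _ hx hx' => absurd hx (by rw [hx']; exact Bool.false_ne_true))
          r vis' heq
        refine ⟨subS_trans (subS_add vis src) hmono, hconn, fun hf => ?_⟩
        obtain ⟨h1, h2, h3⟩ := hfalse hf
        refine ⟨hmono src (set_contains_add_self vis src), h1, ?_⟩
        intro x y hxy hx hxvis
        by_cases hxs : x = src
        · exact h2 y (by rw [← hxs]; exact (mem_adj equations x y).2 hxy)
        · have hx0 : (PySem.Set.add vis src).contains x = false := by
            cases h : (PySem.Set.add vis src).contains x
            · rfl
            · rcases (set_contains_add vis src x).1 h with h' | h'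
              · rw [h'] at hxvis; cases hxvis
              · exact absurd h' hxs
          exact h3 x y hxy hx hx0
      · -- src has no incident equality: its adjacency list is empty
        have hadjnil : (buildGraph equations).getD src [] = [] := by
          rcases h : (buildGraph equations).getD src [] with _ | ⟨y, l⟩
          · rfl
          · exfalso
            have : (src, y) ∈ Pairs equations := (mem_adj equations src y).1 (h ▸ List.mem_cons_self)
            exact hsN (fst_mem_nodes equations src y this)
        rw [hadjnil, List.foldl_nil] at heq
        injection heq with h1 h2; subst h1; subst h2
        refine ⟨subS_add vis src, ?_, ?_⟩
        · intro ht; cases ht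
        · intro _
          refine ⟨set_contains_add_self vis src, hdst0, ?_⟩
          intro x y hxy hx hxvis
          exfalso
          have hxs : x = src := by
            rcases (set_contains_add vis src x).1 hx with h' | h'
            · rw [h'] at hxvis; cases hxvis
            · exact h'
          exact hsN (hxs ▸ fst_mem_nodes equations x y hxy)
theorem canMeet_iff_conn (equations : List String) (src dst : Char) :
    (canMeet (buildGraph equations) (2 * equations.length + 1) src dst PySem.Set.empty).1 = true
      ↔ Conn (Pairs equations) src dst := by
  have hcount : ((((Pairs equations).map Prod.snd)).filter
      (fun c => !(PySem.Set.empty : PySem.Set Char).contains c)).length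
        < 2 * equations.length + 1 := by
    rw [List.filter_eq_self.2 (fun c _ => by rw [set_contains_empty]; rfl)]
    have h1 := pairs_length_le equations
    have h2 : ((Pairs equations).map Prod.snd).length = (Pairs equations).length :=
      List.length_map _
    omega
  rcases hcm : canMeet (buildGraph equations) (2 * equations.length + 1) src dst
      PySem.Set.empty with ⟨r, vis'⟩
  obtain ⟨-, hconn, hfalse⟩ := dfs_post equations (2 * equations.length + 1) src dst
    PySem.Set.empty (set_contains_empty src) (set_contains_empty dst) hcount r vis' hcm
  simp only
  constructor
  · intro hr; exact hconn hr
  · intro hc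
    cases r with
    | true => rfl
    | false =>
      exfalso
      obtain ⟨hs, hd, hclosed⟩ := hfalse rfl
      have hall : ∀ z, Relation.ReflTransGen (PRel (Pairs equations)) src z →
          vis'.contains z = true := by
        intro z hz
        induction hz with
        | refl => exact hs
        | tail _ hwz ih => exact hclosed _ _ hwz ih (set_contains_empty _)
      rw [hall dst hc] at hd; cases hd
-- ---- B: the labelling map and its invariant ----
-- F d x  =  rep.get(x, x): the current representative of x
def F (d : PySem.Dict Char Char) (x : Char) : Char := d.getD x x

-- every value of rep is itself a key mapped to itself (so representatives are fixed points)
def InvD (d : PySem.Dict Char Char) : Prop :=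
  d.keys.Nodup ∧ ∀ v ∈ d.values, d.get? v = some v

theorem invD_empty : InvD PySem.Dict.empty := by
  constructor
  · exact List.nodup_nil
  · intro v hv; cases hv

theorem F_of_get?_eq_some {d : PySem.Dict Char Char} {x v : Char} (h : d.get? x = some v) :
    F d x = v := by
  unfold F; rw [PySem.Dict.getD_eq_get?_getD, h]; rfl

theorem F_of_get?_eq_none {d : PySem.Dict Char Char} {x : Char} (h : d.get? x = none) :
    F d x = x := by
  unfold F; rw [PySem.Dict.getD_eq_get?_getD, h]; rfl

theorem invD_value_fixed {d : PySem.Dict Char Char} (h : InvD d) {k w : Char}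
    (hk : d.get? k = some w) : d.get? w = some w :=
  h.2 w (List.mem_map.2 ⟨(k, w), PySem.Dict.mem_items_of_get?_eq_some d hk, rfl⟩)

theorem not_contains_get? {d : PySem.Dict Char Char} {k : Char}
    (h : d.contains k = false) : d.get? k = none := by
  rw [PySem.Dict.contains_eq_isSome_get?] at h
  exact Option.not_isSome_iff_eq_none.1 (by simp [h])

theorem setdefault_self_invD {d : PySem.Dict Char Char} (a : Char) (h : InvD d) :
    InvD (d.setdefault a a) ∧ (∀ x, F (d.setdefault a a) x = F d x) := by
  cases hc : d.contains a with
  | true =>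
    rw [PySem.Dict.setdefault_of_contains d a hc]
    exact ⟨h, fun _ => rfl⟩
  | false =>
    rw [PySem.Dict.setdefault_of_not_contains d a hc]
    have hnone : d.get? a = none := not_contains_get? hc
    refine ⟨⟨PySem.Dict.nodup_keys_insert d a a h.1, ?_⟩, ?_⟩
    · intro v hv
      rcases PySem.Dict.mem_values_insert d a a v hv with rfl | hv'
      · exact PySem.Dict.get?_insert_self d v v
      · have hvk : d.get? v = some v := h.2 v hv'
        have hva : v ≠ a := fun hh => by rw [hh, hnone] at hvk; cases hvk
        rw [PySem.Dict.get?_insert_of_ne d a hva]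
        exact hvk
    · intro x
      by_cases hx : x = a
      · subst hx
        rw [F_of_get?_eq_some (PySem.Dict.get?_insert_self d x x), F_of_get?_eq_none hnone]
      · unfold F
        rw [PySem.Dict.getD_eq_get?_getD, PySem.Dict.get?_insert_of_ne d a hx,
          ← PySem.Dict.getD_eq_get?_getD]

-- the in-place relabelling pass, on the underlying items list
theorem get?_relabel (ra rb : Char) :
    ∀ (l : List (Char × Char)) (x : Char),
      (PySem.Dict.mk (l.map (fun p => if p.2 = rb then (p.1, ra) else p))).get? x
        = ((PySem.Dict.mk l).get? x).map (fun v => if v = rb then ra else v) := by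
  intro l
  induction l with
  | nil => intro x; rfl
  | cons p l ih =>
    intro x
    have hfst : (if p.2 = rb then (p.1, ra) else p).1 = p.1 := by split_ifs <;> rfl
    rw [List.map_cons, PySem.Dict.get?_mk_cons, PySem.Dict.get?_mk_cons, hfst]
    by_cases hx : p.1 == x
    · rw [if_pos hx, if_pos hx]
      split_ifs with h <;> simp [h]
    · rw [if_neg hx, if_neg hx]
      exact ih x

theorem keys_relabel (ra rb : Char) (l : List (Char × Char)) :
    (PySem.Dict.mk (l.map (fun p => if p.2 = rb then (p.1, ra) else p))).keys
      = (PySem.Dict.mk l).keys := by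
  show (l.map _).map Prod.fst = l.map Prod.fst
  rw [List.map_map]
  apply List.map_congr_left
  intro p _
  show (if p.2 = rb then (p.1, ra) else p).1 = p.1
  split_ifs <;> rfl

theorem values_relabel (ra rb : Char) (l : List (Char × Char)) :
    (PySem.Dict.mk (l.map (fun p => if p.2 = rb then (p.1, ra) else p))).values
      = (PySem.Dict.mk l).values.map (fun v => if v = rb then ra else v) := by
  show (l.map _).map Prod.snd = (l.map Prod.snd).map _
  rw [List.map_map, List.map_map]
  apply List.map_congr_left
  intro p _
  show (if p.2 = rb then (p.1, ra) else p).2 = if p.2 = rb then ra else p.2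
  split_ifs <;> rfl

theorem bMerge_post (d : PySem.Dict Char Char) (a b : Char) (h : InvD d) :
    InvD (bMerge d a b)
      ∧ ∀ x, F (bMerge d a b) x = if F d x = F d b then F d a else F d x := by
  obtain ⟨h1, hF1⟩ := setdefault_self_invD a h
  obtain ⟨h2, hF2⟩ := setdefault_self_invD b h1
  set d1 := d.setdefault a a with hd1
  set d2 := d1.setdefault b b with hd2
  have hF2' : ∀ x, F d2 x = F d x := fun x => (hF2 x).trans (hF1 x)
  have hga1 : d1.get? a = some (F d a) := by
    rw [hd1, PySem.Dict.get?_setdefault_self, ← PySem.Dict.getD_eq_get?_getD]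
    rfl
  have hga2 : d2.get? a = some (F d a) := by
    by_cases hab : a = b
    · rw [hd2, ← hab, PySem.Dict.get?_setdefault_self, hga1]
      rfl
    · rw [hd2, PySem.Dict.get?_setdefault_of_ne d1 b hab, hga1]
  have hgb2 : d2.get? b = some (F d b) := by
    rw [hd2, PySem.Dict.get?_setdefault_self, ← PySem.Dict.getD_eq_get?_getD]
    show some (F d1 b) = some (F d b)
    rw [hF1 b]
  have hra : F d2 a = F d a := hF2' a
  have hrb : F d2 b = F d b := hF2' b
  have hfixa : d2.get? (F d a) = some (F d a) := invD_value_fixed h2 hga2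
  have hfixb : d2.get? (F d b) = some (F d b) := invD_value_fixed h2 hgb2
  have hbm : bMerge d a b =
      (if d1.getD a a ≠ d2.getD b b then
        PySem.Dict.mk (d2.items.map (fun p => if p.2 = d2.getD b b then (p.1, d1.getD a a) else p))
      else d2) := rfl
  have hraeq : d1.getD a a = F d a := F_of_get?_eq_some hga1
  have hrbeq : d2.getD b b = F d b := F_of_get?_eq_some hgb2
  rw [hbm, hraeq, hrbeq]
  by_cases hab : F d a = F d b
  · rw [if_neg (by simpa using hab)]
    refine ⟨h2, fun x => ?_⟩
    rw [hF2' x]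
    split_ifs with hx
    · rw [hx, hab]
    · rfl
  · rw [if_pos (by simpa using hab)]
    set g := fun v => if v = F d b then F d a else v with hg
    set d' := PySem.Dict.mk (d2.items.map (fun p => if p.2 = F d b then (p.1, F d a) else p)) with hd'
    have hget : ∀ x, d'.get? x = (d2.get? x).map g := by
      intro x
      rw [hd']
      exact get?_relabel (F d a) (F d b) d2.items x
    have hFd' : ∀ x, F d' x = if F d x = F d b then F d a else F d x := by
      intro x
      rcases hx2 : d2.get? x with _ | v
      · have hxne : x ≠ F d b := fun hh => by rw [hh, hfixb] at hx2; cases hx2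
        have hFx : F d x = x := by rw [← hF2' x]; exact F_of_get?_eq_none hx2
        have hF'x : F d' x = x := F_of_get?_eq_none (by rw [hget x, hx2]; rfl)
        rw [hF'x, hFx, if_neg hxne]
      · have hsome : d'.get? x = some (g v) := by rw [hget x, hx2]; rfl
        rw [F_of_get?_eq_some hsome, ← hF2' x, F_of_get?_eq_some hx2]
    refine ⟨⟨?_, ?_⟩, hFd'⟩
    · rw [hd', keys_relabel]
      exact h2.1
    · intro v hv
      rw [hd', values_relabel] at hv
      rcases List.mem_map.1 hv with ⟨w, hw, rfl⟩
      have hwfix : d2.get? w = some w := h2.2 w hw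
      have hgww : (if w = F d b then F d a else w) = g w := by rw [hg]
      rw [hgww, hget]
      by_cases hwb : w = F d b
      · have hgw : g w = F d a := by simp only [hg]; simp [hwb]
        rw [hgw, hfixa, Option.map_some]
        simp [hg]
      · have hgw : g w = w := by simp only [hg]; simp [hwb]
        rw [hgw, hwfix, Option.map_some, hgw]
-- ---- equivalence closures ----
theorem eqvGen_nil {x y : Char} :
    Relation.EqvGen (PRel ([] : List (Char × Char))) x y ↔ x = y := by
  constructor
  · intro h
    induction h with
    | rel u v huv => cases huv
    | refl u => rfl
    | symm u v _ ih => exact ih.symm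
    | trans u v w _ _ ih1 ih2 => exact ih1.trans ih2
  · rintro rfl; exact Relation.EqvGen.refl x

theorem eqvTrans {r : Char → Char → Prop} {u v w : Char}
    (h1 : Relation.EqvGen r u v) (h2 : Relation.EqvGen r v w) : Relation.EqvGen r u w :=
  Relation.EqvGen.trans u v w h1 h2

theorem eqvGen_snoc (Q : List (Char × Char)) (a b x y : Char) :
    Relation.EqvGen (PRel (Q ++ [(a, b)])) x y ↔
      (Relation.EqvGen (PRel Q) x y ∨
        (Relation.EqvGen (PRel Q) x a ∧ Relation.EqvGen (PRel Q) b y) ∨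
        (Relation.EqvGen (PRel Q) x b ∧ Relation.EqvGen (PRel Q) a y)) := by
  constructor
  · intro h
    induction h with
    | rel u v huv =>
      rcases List.mem_append.1 huv with h | h
      · exact Or.inl (Relation.EqvGen.rel u v h)
      · simp only [List.mem_singleton, Prod.mk.injEq] at h
        obtain ⟨rfl, rfl⟩ := h
        exact Or.inr (Or.inl ⟨Relation.EqvGen.refl u, Relation.EqvGen.refl v⟩)
    | refl u => exact Or.inl (Relation.EqvGen.refl u)
    | symm u v _ ih =>
      rcases ih with h | ⟨h1, h2⟩ | ⟨h1, h2⟩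
      · exact Or.inl (Relation.EqvGen.symm u v h)
      · exact Or.inr (Or.inr ⟨Relation.EqvGen.symm b v h2, Relation.EqvGen.symm u a h1⟩)
      · exact Or.inr (Or.inl ⟨Relation.EqvGen.symm a v h2, Relation.EqvGen.symm u b h1⟩)
    | trans u v w _ _ ih1 ih2 =>
      rcases ih1 with h | ⟨h1, h2⟩ | ⟨h1, h2⟩ <;> rcases ih2 with h' | ⟨h1', h2'⟩ | ⟨h1', h2'⟩
      · exact Or.inl (eqvTrans h h')
      · exact Or.inr (Or.inl ⟨eqvTrans h h1', h2'⟩)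
      · exact Or.inr (Or.inr ⟨eqvTrans h h1', h2'⟩)
      · exact Or.inr (Or.inl ⟨h1, eqvTrans h2 h'⟩)
      · exact Or.inr (Or.inl ⟨h1, h2'⟩)
      · exact Or.inl (eqvTrans h1 h2')
      · exact Or.inr (Or.inr ⟨h1, eqvTrans h2 h'⟩)
      · exact Or.inl (eqvTrans h1 h2')
      · exact Or.inr (Or.inr ⟨h1, h2'⟩)
  · have hmono : ∀ {u v : Char}, Relation.EqvGen (PRel Q) u v →
        Relation.EqvGen (PRel (Q ++ [(a, b)])) u v := by
      intro u v h
      exact Relation.EqvGen.mono (fun p q hpq => List.mem_append_left _ hpq) h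
    have hab : Relation.EqvGen (PRel (Q ++ [(a, b)])) a b :=
      Relation.EqvGen.rel a b (List.mem_append_right _ (List.mem_singleton.2 rfl))
    rintro (h | ⟨h1, h2⟩ | ⟨h1, h2⟩)
    · exact hmono h
    · exact eqvTrans (eqvTrans (hmono h1) hab) (hmono h2)
    · exact eqvTrans (eqvTrans (hmono h1) (Relation.EqvGen.symm a b hab)) (hmono h2)

-- ---- B's fold computes the equivalence closure of the equalities ----
theorem b_fold (equations : List String) :
    InvD (equations.foldl bStep PySem.Dict.empty) ∧
      ∀ x y, (F (equations.foldl bStep PySem.Dict.empty) x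
                = F (equations.foldl bStep PySem.Dict.empty) y
              ↔ Relation.EqvGen (PRel (QPairs equations)) x y) := by
  induction equations using List.reverseRecOn with
  | nil =>
    rw [List.foldl_nil]
    refine ⟨invD_empty, fun x y => ?_⟩
    have hx : F PySem.Dict.empty x = x := F_of_get?_eq_none (PySem.Dict.get?_empty x)
    have hy : F PySem.Dict.empty y = y := F_of_get?_eq_none (PySem.Dict.get?_empty y)
    have hqnil : QPairs [] = [] := rfl
    rw [hx, hy, hqnil, eqvGen_nil]
  | append_singleton eqs e ih =>
    obtain ⟨hInv, hiff⟩ := ih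
    rw [List.foldl_append, List.foldl_cons, List.foldl_nil]
    have hq : QPairs (eqs ++ [e])
        = QPairs eqs ++ (if chAt e 1 = '=' then [(chAt e 0, chAt e 3)] else []) := by
      unfold QPairs
      rw [List.flatMap_append, List.flatMap_cons, List.flatMap_nil, List.append_nil]
    set d := eqs.foldl bStep PySem.Dict.empty with hd
    by_cases hc : chAt e 1 = '='
    · rw [hq, if_pos hc]
      have hb : bStep d e = bMerge d (chAt e 0) (chAt e 3) := by
        unfold bStep; rw [if_pos hc]
      rw [hb]
      obtain ⟨hInv', hF'⟩ := bMerge_post d (chAt e 0) (chAt e 3) hInv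
      refine ⟨hInv', fun x y => ?_⟩
      rw [hF' x, hF' y, eqvGen_snoc, ← hiff x y, ← hiff x (chAt e 0), ← hiff (chAt e 3) y,
        ← hiff x (chAt e 3), ← hiff (chAt e 0) y]
      set Fx := F d x
      set Fy := F d y
      set Fa := F d (chAt e 0)
      set Fb := F d (chAt e 3)
      split_ifs with h1 h2 h2 <;> constructor <;> intro h
      · exact Or.inl (h1.trans h2.symm)
      · rfl
      · exact Or.inr (Or.inr ⟨h1, h⟩)
      · rcases h with h | ⟨ha, hb⟩ | ⟨ha, hb⟩
        · exact absurd (h ▸ h1) h2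
        · exact absurd hb.symm h2
        · exact hb
      · exact Or.inr (Or.inl ⟨h, h2.symm⟩)
      · rcases h with h | ⟨ha, hb⟩ | ⟨ha, hb⟩
        · exact absurd (h.symm ▸ h2) h1
        · exact ha
        · exact absurd ha h1
      · exact Or.inl h
      · rcases h with h | ⟨ha, hb⟩ | ⟨ha, hb⟩
        · exact h
        · exact absurd (hb.symm) h2
        · exact absurd ha h1
    · rw [hq, if_neg hc, List.append_nil]
      have hb : bStep d e = d := by unfold bStep; rw [if_neg hc]
      rw [hb]
      exact ⟨hInv, hiff⟩

-- ---- connectivity in A's symmetric graph = equivalence closure of B's pairs ----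
theorem conn_symm (equations : List String) {x y : Char}
    (h : Conn (Pairs equations) x y) : Conn (Pairs equations) y x := by
  induction h with
  | refl => exact Relation.ReflTransGen.refl
  | tail _ hzc ih => exact Relation.ReflTransGen.head (pairs_symm equations _ _ hzc) ih

theorem conn_iff_eqv (equations : List String) (x y : Char) :
    Conn (Pairs equations) x y ↔ Relation.EqvGen (PRel (QPairs equations)) x y := by
  constructor
  · intro h
    induction h with
    | refl => exact Relation.EqvGen.refl x
    | tail _ hzc ih =>
      rcases (mem_pairs_iff_qpairs equations _ _).1 hzc with h' | h'
      · exact eqvTrans ih (Relation.EqvGen.rel _ _ h')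
      · exact eqvTrans ih (Relation.EqvGen.symm _ _ (Relation.EqvGen.rel _ _ h'))
  · intro h
    induction h with
    | rel u v huv =>
      exact Relation.ReflTransGen.single ((mem_pairs_iff_qpairs equations u v).2 (Or.inl huv))
    | refl u => exact Relation.ReflTransGen.refl
    | symm u v _ ih => exact conn_symm equations ih
    | trans u v w _ _ ih1 ih2 => exact ih1.trans ih2

-- ---- top level: the two result loops agree elementwise ----
theorem check_eq_all (g : PySem.Dict Char (List Char)) (fuel : Nat)
    (rep : PySem.Dict Char Char) :
    ∀ l : List String,
      (∀ e ∈ l, chAt e 1 = '!' →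
        (canMeet g fuel (chAt e 0) (chAt e 3) PySem.Set.empty).1
          = (rep.getD (chAt e 0) (chAt e 0) == rep.getD (chAt e 3) (chAt e 3))) →
      checkIneqs g fuel l
        = l.all (fun e =>
            !(chAt e 1 == '!' && rep.getD (chAt e 0) (chAt e 0) == rep.getD (chAt e 3) (chAt e 3))) := by
  intro l
  induction l with
  | nil => intro _; rfl
  | cons e rest ih =>
    intro h
    have hrest := ih (fun e' he' => h e' (List.mem_cons_of_mem e he'))
    have hcons : checkIneqs g fuel (e :: rest)
        = if chAt e 1 = '!' then
            (if (canMeet g fuel (chAt e 0) (chAt e 3) PySem.Set.empty).1 then false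
             else checkIneqs g fuel rest)
          else checkIneqs g fuel rest := rfl
    rw [hcons, List.all_cons]
    by_cases hc : chAt e 1 = '!'
    · rw [if_pos hc, h e List.mem_cons_self hc]
      have hbeq : (chAt e 1 == '!') = true := beq_iff_eq.2 hc
      rw [hbeq, Bool.true_and]
      cases hb : (rep.getD (chAt e 0) (chAt e 0) == rep.getD (chAt e 3) (chAt e 3)) with
      | true => simp
      | false => simp [hrest]
    · rw [if_neg hc, hrest]
      have hbeq : (chAt e 1 == '!') = false := by
        rw [beq_eq_false_iff_ne]; exact hc
      rw [hbeq]
      simp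

theorem equationsPossible_1_spec : Claim_equal_equationsPossible_1 := by
  unfold Claim_equal_equationsPossible_1 Spec_equationsPossible_1
  intro equations _ _
  unfold equationsPossible_1 equationsPossible_1_alt
  apply check_eq_all
  intro e _ hc
  obtain ⟨_, hiff⟩ := b_fold equations
  rcases hcm : (canMeet (buildGraph equations) (2 * equations.length + 1) (chAt e 0) (chAt e 3)
      PySem.Set.empty).1 with _ | _
  · symm
    rw [beq_eq_false_iff_ne]
    intro hFF
    have hconn : Conn (Pairs equations) (chAt e 0) (chAt e 3) :=
      (conn_iff_eqv equations _ _).2 ((hiff _ _).1 hFF)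
    rw [(canMeet_iff_conn equations _ _).2 hconn] at hcm
    cases hcm
  · symm
    rw [beq_iff_eq]
    exact (hiff _ _).2 ((conn_iff_eqv equations _ _).1
      ((canMeet_iff_conn equations _ _).1 hcm))
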